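-- pv_equiv track=rewrite | github.com/JerameeUC/Agentic-Chat-bot- | guardrails/memory/rag/retriever.py | _extract_passage
-- ===== SOURCE A (Python) =====
-- from typing import Iterable, List, Optional, Tuple
--
-- def _find_all(term: str, text: str) -> List[int]:
--     """Return starting indices of all case-insensitive matches of term in text."""
--     if not term or not text:
--         return []
--     term_l = term.lower()
--     low = text.lower()
--     out: List[int] = []
--     i = low.find(term_l)
--     while i >= 0:
--         out.append(i)
--         i = low.find(term_l, i + 1)
--     return out
--
-- def _extract_passage(text: str, q_tokens: List[str], window: int = 350, overlap: int = 60) -> Tuple[int, int, str]: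
--     """
--     Pick a passage around the earliest match of any query token.
--     If no match found, return the first window.
--     """
--     if not text:
--         return 0, 0, ""
--
--     hit_positions: List[int] = []
--     for qt in q_tokens:
--         hit_positions.extend(_find_all(qt, text))
--
--     if hit_positions:
--         start = max(0, min(hit_positions) - overlap)
--         end = min(len(text), start + window)
--     else:
--         start = 0
--         end = min(len(text), window)
--
--     return start, end, text[start:end].strip()
-- ===== SOURCE B (Python) =====
-- def _extract_passage(text, q_tokens, window=350, overlap=60):
--     """
--     Pick a passage around the earliest match of any query token.
--     If no match found, return the first window.
--     (Only the FIRST occurrence of each token is needed: the earliest hit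
--     overall is the minimum of the first hits, so no full enumeration.)
--     """
--     if not text:
--         return 0, 0, ""
--
--     low = text.lower()
--     best = -1
--     for qt in q_tokens:
--         if not qt:
--             continue
--         i = low.find(qt.lower())
--         if i >= 0 and (best < 0 or i < best):
--             best = i
--
--     if best >= 0:
--         start = max(0, best - overlap)
--         end = min(len(text), start + window)
--     else:
--         start = 0
--         end = min(len(text), window)
--
--     return start, end, text[start:end].strip()
-- ===== Notes on version B (the rewrite author's own statement) =====
-- stated objective: faster
-- what changed: B keeps a running minimum of only the FIRST case-insensitive occurrence of each token (one find per token, branch-selected start/end) instead of A's enumeration of every occurrence of every token into a list whose min is then taken.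
import Mathlib
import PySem

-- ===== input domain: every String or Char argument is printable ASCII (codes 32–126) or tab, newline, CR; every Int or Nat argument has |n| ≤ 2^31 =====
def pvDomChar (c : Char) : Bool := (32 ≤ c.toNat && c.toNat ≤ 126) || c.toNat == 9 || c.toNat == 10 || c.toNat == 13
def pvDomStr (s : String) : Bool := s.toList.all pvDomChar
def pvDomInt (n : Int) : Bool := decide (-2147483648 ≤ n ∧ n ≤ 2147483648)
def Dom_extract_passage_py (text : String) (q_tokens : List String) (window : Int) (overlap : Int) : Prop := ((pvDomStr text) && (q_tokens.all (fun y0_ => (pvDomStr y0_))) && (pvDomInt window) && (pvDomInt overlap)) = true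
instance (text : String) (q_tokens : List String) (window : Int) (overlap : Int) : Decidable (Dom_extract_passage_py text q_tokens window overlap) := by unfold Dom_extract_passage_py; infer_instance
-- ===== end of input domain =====

-- B finds only the FIRST occurrence of each token and keeps a running minimum,
-- instead of A's full enumeration of every occurrence of every token.

-- ===== PORT A =====
-- the while-loop of _find_all: i is the current find result; the found indices
-- strictly increase and stay below low.length, so fuel low.length + 1 always suffices
def pvFindAllLoop (low term_l : List Char) : Nat → Int → List Int
  | 0, _ => []
  | fuel + 1, i =>
      if 0 ≤ i then
        i :: pvFindAllLoop low term_l fuel (PySem.Chars.findFrom low term_l (i + 1))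
      else []

def pvFindAll (term text : String) : List Int :=
  if term = "" ∨ text = "" then []
  else
    let term_l := (PySem.Str.lower term).toList
    let low := (PySem.Str.lower text).toList
    pvFindAllLoop low term_l (low.length + 1) (PySem.Chars.find low term_l)

def extract_passage_py (text : String) (q_tokens : List String) (window : Int) (overlap : Int) : Int × Int × String :=
  if text = "" then (0, 0, "")
  else
    let hit_positions := q_tokens.foldl (fun acc qt => acc ++ pvFindAll qt text) []
    match hit_positions with
    | [] =>
        let start : Int := 0
        let stop : Int := min (PySem.Str.len text) window
        (start, stop, PySem.Str.strip (PySem.Str.slice text (some start) (some stop)))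
    | h :: t =>
        -- min(hit_positions) as the running-min loop (PySem.List.min?_id_cons)
        let start : Int := max 0 (t.foldl min h - overlap)
        let stop : Int := min (PySem.Str.len text) (start + window)
        (start, stop, PySem.Str.strip (PySem.Str.slice text (some start) (some stop)))

-- ===== PORT B =====
def extract_passage_py_alt (text : String) (q_tokens : List String) (window : Int) (overlap : Int) : Int × Int × String :=
  if text = "" then (0, 0, "")
  else
    let low := PySem.Str.lower text
    let best := q_tokens.foldl
      (fun best qt =>
        if qt = "" then best
        else
          let i := PySem.Str.find low (PySem.Str.lower qt)
          if 0 ≤ i ∧ (best < 0 ∨ i < best) then i else best) (-1)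
    let start : Int := if 0 ≤ best then max 0 (best - overlap) else 0
    let stop : Int :=
      if 0 ≤ best then min (PySem.Str.len text) (start + window)
      else min (PySem.Str.len text) window
    (start, stop, PySem.Str.strip (PySem.Str.slice text (some start) (some stop)))

-- ===== PRECONDITION & SPEC =====
def Spec_extract_passage_py (text : String) (q_tokens : List String) (window : Int) (overlap : Int) (out : Int × Int × String) : Prop := out = extract_passage_py_alt text q_tokens window overlap
instance (text : String) (q_tokens : List String) (window : Int) (overlap : Int) (out : Int × Int × String) : Decidable (Spec_extract_passage_py text q_tokens window overlap out) := by unfold Spec_extract_passage_py; infer_instance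

-- ===== CLAIM (what is proved, stated in full; the proofs are below) =====
def Claim_equal_extract_passage_py : Prop := ∀ (text : String) (q_tokens : List String) (window : Int) (overlap : Int), Dom_extract_passage_py text q_tokens window overlap → Spec_extract_passage_py text q_tokens window overlap (extract_passage_py text q_tokens window overlap)

-- ===== LEMMAS AND PROOFS =====

-- proof-only abbreviations
def pvF (text qt : String) : Int :=
  PySem.Chars.find (PySem.Str.lower text).toList (PySem.Str.lower qt).toList

def pvStep (text : String) : Int → String → Int := fun best qt =>
  if qt = "" then best
  else if 0 ≤ PySem.Str.find (PySem.Str.lower text) (PySem.Str.lower qt) ∧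
          (best < 0 ∨ PySem.Str.find (PySem.Str.lower text) (PySem.Str.lower qt) < best)
       then PySem.Str.find (PySem.Str.lower text) (PySem.Str.lower qt) else best

def pvGood (text qt : String) : Prop := qt ≠ "" ∧ 0 ≤ pvF text qt

theorem pvFindEq (text qt : String) :
    PySem.Str.find (PySem.Str.lower text) (PySem.Str.lower qt) = pvF text qt := by
  simp [pvF, PySem.Str.find_eq]

theorem pvFindFrom_ge (s sub : List Char) (j : Int) (hj : 0 ≤ j) :
    PySem.Chars.findFrom s sub j = -1 ∨ j ≤ PySem.Chars.findFrom s sub j := by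
  have hr := PySem.Chars.neg_one_le_find (List.drop j.toNat (List.take (s.length : Int).toNat s)) sub
  simp only [PySem.Chars.findFrom, if_neg (by omega : ¬ j < 0)]
  split_ifs with h1 h2
  · left; rfl
  · left; rfl
  · right; omega

theorem pvFindAllLoop_neg (low term_l : List Char) (fuel : Nat) (i : Int) (hi : ¬ 0 ≤ i) :
    pvFindAllLoop low term_l fuel i = [] := by
  cases fuel <;> simp [pvFindAllLoop, hi]

theorem pvFindAllLoop_ge (low term_l : List Char) (fuel : Nat) :
    ∀ i : Int, 0 ≤ i → ∀ x ∈ pvFindAllLoop low term_l fuel i, i ≤ x := by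
  induction fuel with
  | zero => intro i _ x hx; simp [pvFindAllLoop] at hx
  | succ fuel ih =>
    intro i hi x hx
    rw [pvFindAllLoop, if_pos hi] at hx
    rcases List.mem_cons.1 hx with rfl | hx
    · exact le_refl x
    · rcases pvFindFrom_ge low term_l (i + 1) (by omega) with hneg | hge
      · rw [hneg, pvFindAllLoop_neg low term_l fuel (-1) (by omega)] at hx
        simp at hx
      · have := ih _ (by omega) x hx
        omega

theorem pvFindAll_empty (text qt : String) (h : ¬ pvGood text qt) :
    pvFindAll qt text = [] := by
  rw [pvFindAll]
  by_cases hq : qt = "" ∨ text = ""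
  · rw [if_pos hq]
  · rw [if_neg hq]
    rw [not_or] at hq
    have hf : ¬ 0 ≤ pvF text qt := by
      intro hc; exact h ⟨hq.1, hc⟩
    exact pvFindAllLoop_neg _ _ _ _ hf

theorem pvFindAll_good (text qt : String) (ht : ¬ text = "") (hg : pvGood text qt) :
    pvF text qt ∈ pvFindAll qt text ∧ ∀ x ∈ pvFindAll qt text, pvF text qt ≤ x := by
  obtain ⟨hq, hf0⟩ := hg
  rw [pvFindAll, if_neg (by tauto)]
  simp only [pvF] at hf0 ⊢
  rw [pvFindAllLoop, if_pos hf0]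
  refine ⟨List.mem_cons_self, ?_⟩
  intro x hx
  rcases List.mem_cons.1 hx with rfl | hx
  · exact le_refl _
  · rcases pvFindFrom_ge (PySem.Str.lower text).toList (PySem.Str.lower qt).toList
      (PySem.Chars.find (PySem.Str.lower text).toList (PySem.Str.lower qt).toList + 1)
      (by omega) with hneg | hge
    · rw [hneg, pvFindAllLoop_neg _ _ _ (-1) (by omega)] at hx
      simp at hx
    · have := pvFindAllLoop_ge (PySem.Str.lower text).toList (PySem.Str.lower qt).toList
        _ _ (by omega) x hx
      omega

-- B's running-minimum fold, characterised
theorem pvBest_le (text : String) (l : List String) :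
    ∀ best : Int, 0 ≤ best → l.foldl (pvStep text) best ≤ best ∧ 0 ≤ l.foldl (pvStep text) best := by
  induction l with
  | nil => intro best h; simp [h]
  | cons qt rest ih =>
    intro best h
    have hstep : pvStep text best qt ≤ best ∧ 0 ≤ pvStep text best qt := by
      rw [pvStep]; split_ifs <;> omega
    have := ih (pvStep text best qt) hstep.2
    simp only [List.foldl_cons]
    omega

theorem pvBest_nonneg_of_good (text : String) (l : List String) :
    ∀ best : Int, (∃ qt ∈ l, pvGood text qt) → 0 ≤ l.foldl (pvStep text) best := by
  induction l with
  | nil => intro best h; simp at h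
  | cons qt rest ih =>
    intro best h
    simp only [List.foldl_cons]
    rcases h with ⟨qt', hmem, hg⟩
    rcases List.mem_cons.1 hmem with rfl | hmem'
    · have hstep : 0 ≤ pvStep text best qt' := by
        rw [pvStep, if_neg hg.1, pvFindEq]
        split_ifs with hc
        · exact hg.2
        · rw [not_and_or, not_or] at hc
          rcases hc with hc | hc
          · exact absurd hg.2 hc
          · omega
      exact (pvBest_le text rest _ hstep).2
    · exact ih _ ⟨qt', hmem', hg⟩

theorem pvBest_lb (text : String) (l : List String) :
    ∀ best : Int, -1 ≤ best →
      ∀ qt ∈ l, pvGood text qt → l.foldl (pvStep text) best ≤ pvF text qt := by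
  induction l with
  | nil => intro best _ qt h; simp at h
  | cons qt0 rest ih =>
    intro best hb qt hmem hg
    simp only [List.foldl_cons]
    have hstep_ge : -1 ≤ pvStep text best qt0 := by
      rw [pvStep]; split_ifs <;> omega
    rcases List.mem_cons.1 hmem with rfl | hmem'
    · -- head token: step result is ≤ pvF text qt, and stays so
      have hstep : pvStep text best qt ≤ pvF text qt ∧ 0 ≤ pvStep text best qt := by
        rw [pvStep, if_neg hg.1, pvFindEq]
        have := hg.2
        split_ifs with hc <;> omega
      have := pvBest_le text rest _ hstep.2
      omega
    · exact ih _ hstep_ge qt hmem' hg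

theorem pvBest_mem (text : String) (l : List String) :
    ∀ best : Int,
      l.foldl (pvStep text) best = best ∨
      ∃ qt ∈ l, pvGood text qt ∧ l.foldl (pvStep text) best = pvF text qt := by
  induction l with
  | nil => intro best; simp
  | cons qt0 rest ih
  =>
    intro best
    simp only [List.foldl_cons]
    have hstep : pvStep text best qt0 = best ∨
        (pvGood text qt0 ∧ pvStep text best qt0 = pvF text qt0) := by
      rw [pvStep]
      split_ifs with h1 h2
      · left; rfl
      · right
        rw [pvFindEq] at h2
        exact ⟨⟨h1, h2.1⟩, pvFindEq text qt0⟩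
      · left; rfl
    rcases ih (pvStep text best qt0) with heq | ⟨qt, hmem, hg, heq⟩
    · rw [heq]
      rcases hstep with h | ⟨hg, h⟩
      · left; exact h
      · right; exact ⟨qt0, List.mem_cons_self, hg, h⟩
    · right; exact ⟨qt, List.mem_cons.2 (Or.inr hmem), hg, heq⟩

-- ===== VERDICT (by name: the statement is the Claim_ definition above) =====
theorem extract_passage_py_spec : Claim_equal_extract_passage_py := by
  intro text q_tokens window overlap _
  rw [Spec_extract_passage_py]
  by_cases ht : text = ""
  · simp [extract_passage_py, extract_passage_py_alt, ht]
  · have hfold : (fun (best : Int) (qt : String) =>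
        if qt = "" then best
        else if 0 ≤ PySem.Str.find (PySem.Str.lower text) (PySem.Str.lower qt) ∧
                (best < 0 ∨ PySem.Str.find (PySem.Str.lower text) (PySem.Str.lower qt) < best)
             then PySem.Str.find (PySem.Str.lower text) (PySem.Str.lower qt) else best)
        = pvStep text := rfl
    simp only [extract_passage_py, extract_passage_py_alt, if_neg ht,
      PySem.List.foldl_append_eq_flatMap, List.nil_append]
    rw [hfold]
    set best := q_tokens.foldl (pvStep text) (-1) with hbest
    by_cases hb : 0 ≤ best
    · -- some token matched
      rcases pvBest_mem text q_tokens (-1) with heq | ⟨qt0, hmem0, hg0, heq⟩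
      · rw [← hbest] at heq; omega
      · rw [← hbest] at heq
        have hmemhits : pvF text qt0 ∈ q_tokens.flatMap (fun qt => pvFindAll qt text) :=
          List.mem_flatMap.2 ⟨qt0, hmem0, (pvFindAll_good text qt0 ht hg0).1⟩
        rcases hhits : q_tokens.flatMap (fun qt => pvFindAll qt text) with _ | ⟨h, t⟩
        · rw [hhits] at hmemhits; simp at hmemhits
        · -- min of hits equals best
          have hm_mem : t.foldl min h ∈ h :: t := by
            rcases PySem.List.foldl_min_mem t h with he | hm
            · rw [he]; exact List.mem_cons_self
            · exact List.mem_cons.2 (Or.inr hm)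
          have hm_lb : ∀ y ∈ h :: t, t.foldl min h ≤ y := by
            intro y hy
            rcases List.mem_cons.1 hy with rfl | hy'
            · exact (PySem.List.foldl_min_le t y).1
            · exact (PySem.List.foldl_min_le t h).2 y hy'
          have h1 : t.foldl min h ≤ best := by
            rw [heq]
            apply hm_lb
            rw [← hhits]; exact hmemhits
          have h2 : best ≤ t.foldl min h := by
            rw [← hhits] at hm_mem
            rcases List.mem_flatMap.1 hm_mem with ⟨qt, hmem, hx⟩
            have hg : pvGood text qt := by
              by_contra hng
              rw [pvFindAll_empty text qt hng] at hx
              simp at hx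
            have hle : pvF text qt ≤ t.foldl min h :=
              (pvFindAll_good text qt ht hg).2 _ hx
            have := pvBest_lb text q_tokens (-1) (by omega) qt hmem hg
            rw [← hbest] at this
            omega
          have hm : t.foldl min h = best := le_antisymm h1 h2
          simp only [hm, if_pos hb]
    · -- no token matched: best = -1 and every pvFindAll is empty
      have hng : ∀ qt ∈ q_tokens, ¬ pvGood text qt := by
        intro qt hmem hg
        exact hb (pvBest_nonneg_of_good text q_tokens (-1) ⟨qt, hmem, hg⟩)
      have hhits : q_tokens.flatMap (fun qt => pvFindAll qt text) = [] := by
        rw [List.flatMap_eq_nil_iff]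
        intro qt hmem
        exact pvFindAll_empty text qt (hng qt hmem)
      simp only [hhits, if_neg hb]
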